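-- pv_equiv track=rewrite | github.com/D2R-Reimagined/d2r-reimagined-mod | scripts/weapon_txt_convert.py | get_active_columns
-- ===== SOURCE A (Python) =====
-- type_display_map = {
--     "axe": "Axe",
--     "wand": "Wand",
--     "club": "Club",
--     "scep": "Scepter",
--     "mace": "Mace",
--     "hamm": "Hammer",
--     "swor": "Sword",
--     "knif": "Dagger",
--     "tkni": "Throwing Dagger",
--     "taxe": "Throwing Axe",
--     "jave": "Javelin",
--     "spea": "Spear",
--     "pole": "Polearm",
--     "staf": "Staff",
--     "bow": "Bow",
--     "xbow": "Crossbow",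
--     "tpot": "Throwing Potion",
--     "h2h": "Claw",
--     "h2h2": "Claw (Mods)",
--     "orb": "Sorceress Orb",
--     "abow": "Amazon Bow",
--     "aspe": "Amazon Spear",
--     "ajav": "Amazon Javelin"
-- }
--
-- fields = [
--     "name", "type", "type2",
--     ("mindam", "maxdam"),
--     ("2handmindam", "2handmaxdam"),
--     ("minmisdam", "maxmisdam"),
--     "speed", "reqstr", "reqdex", "levelreq", "gemsockets"
-- ]
--
-- def merge_fields(row, pair):
--     a, b = pair
--     av = row.get(a, "")
--     bv = row.get(b, "")
--     if (not av or av.strip() == "0") and (not bv or bv.strip() == "0"):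
--         return ""
--     if not av or av.strip() == "0":
--         return bv if bv and bv.strip() != "0" else ""
--     if not bv or bv.strip() == "0":
--         return av if av and av.strip() != "0" else ""
--     return f"{av}-{bv}"
--
-- def process_type2(val):
--     if "1wep" in val:
--         return ""
--     elif "slam" in val:
--         return "Slam"
--     else:
--         return val
--
-- def get_type_display(type_code):
--     return type_display_map.get(type_code, type_code)
--
-- def blank_if_zero(val):
--     return "" if not val or val.strip() == "0" else val
--
-- def get_active_columns(data):
--     # Scan all rows and find which columns are not empty for this data set
--     active = []
--     for idx, field in enumerate(fields):
--         found = False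
--         for row in data:
--             if isinstance(field, tuple):
--                 val = merge_fields(row, field)
--             elif field == "type2":
--                 val = process_type2(row.get("type2", ""))
--             elif field == "type":
--                 val = get_type_display(row.get("type", ""))
--             else:
--                 val = blank_if_zero(row.get(field, ""))
--             if val != "":
--                 found = True
--                 break
--         if found:
--             active.append(idx)
--     return active
-- ===== SOURCE B (Python) =====
-- # B: instead of building each column's display string and testing it for emptiness (A),
-- # decide activity directly with a boolean predicate per field (no display map, no string
-- # building), and fold one pass over the rows into per-field flags.
-- fields = [
--     "name", "type", "type2",
--     ("mindam", "maxdam"),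
--     ("2handmindam", "2handmaxdam"),
--     ("minmisdam", "maxmisdam"),
--     "speed", "reqstr", "reqdex", "levelreq", "gemsockets"
-- ]
--
-- def _nonzero(v):
--     # blank_if_zero(v) is non-empty exactly when v is non-empty and v.strip() != "0"
--     return bool(v) and v.strip() != "0"
--
-- def _is_active(row, field):
--     if isinstance(field, tuple):
--         # merge_fields is non-empty iff at least one of the pair is non-zero
--         return _nonzero(row.get(field[0], "")) or _nonzero(row.get(field[1], ""))
--     v = row.get(field, "")
--     if field == "type2":
--         # process_type2 is non-empty iff v is non-empty and has no "1wep"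
--         return v != "" and "1wep" not in v
--     if field == "type":
--         # the display map has non-empty keys and values, default = the code itself
--         return v != ""
--     return _nonzero(v)
--
-- def get_active_columns(data):
--     flags = [False] * len(fields)
--     for row in data:
--         flags = [f or _is_active(row, fld) for f, fld in zip(flags, fields)]
--     return [i for i, f in enumerate(flags) if f]
-- ===== Notes on version B (the rewrite author's own statement) =====
-- stated objective: alternative
-- what changed: A builds each column's display value (merge, type-display lookup, zero-blanking) per field with a rescan of the data per field; B never builds a value: it decides activity with a direct boolean predicate per field and ORs it into per-field flags in a single pass over the rows.
import Mathlib
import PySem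

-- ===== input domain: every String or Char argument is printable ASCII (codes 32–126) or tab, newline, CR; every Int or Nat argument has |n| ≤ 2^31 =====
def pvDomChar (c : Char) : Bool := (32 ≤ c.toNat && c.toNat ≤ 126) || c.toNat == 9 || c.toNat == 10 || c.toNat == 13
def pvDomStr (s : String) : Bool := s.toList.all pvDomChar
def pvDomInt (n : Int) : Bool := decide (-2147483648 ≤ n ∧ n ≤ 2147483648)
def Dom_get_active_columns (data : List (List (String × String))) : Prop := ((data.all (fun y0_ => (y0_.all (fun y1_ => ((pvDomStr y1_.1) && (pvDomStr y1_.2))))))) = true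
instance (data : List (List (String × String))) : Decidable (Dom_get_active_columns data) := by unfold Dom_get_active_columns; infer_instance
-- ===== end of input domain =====

-- B never builds the per-cell display strings A constructs: it decides each field's activity
-- with a direct boolean predicate and ORs it into per-field flags in one pass over the rows
-- (objective: alternative).

-- ===== PORT A =====
def type_display_map : List (String × String) :=
  [("axe", "Axe"), ("wand", "Wand"), ("club", "Club"), ("scep", "Scepter"),
   ("mace", "Mace"), ("hamm", "Hammer"), ("swor", "Sword"), ("knif", "Dagger"),
   ("tkni", "Throwing Dagger"), ("taxe", "Throwing Axe"), ("jave", "Javelin"),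
   ("spea", "Spear"), ("pole", "Polearm"), ("staf", "Staff"), ("bow", "Bow"),
   ("xbow", "Crossbow"), ("tpot", "Throwing Potion"), ("h2h", "Claw"),
   ("h2h2", "Claw (Mods)"), ("orb", "Sorceress Orb"), ("abow", "Amazon Bow"),
   ("aspe", "Amazon Spear"), ("ajav", "Amazon Javelin")]

-- a field is either a plain column name or a (min, max) pair of names
def fields : List (String ⊕ (String × String)) :=
  [Sum.inl "name", Sum.inl "type", Sum.inl "type2",
   Sum.inr ("mindam", "maxdam"),
   Sum.inr ("2handmindam", "2handmaxdam"),
   Sum.inr ("minmisdam", "maxmisdam"),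
   Sum.inl "speed", Sum.inl "reqstr", Sum.inl "reqdex", Sum.inl "levelreq", Sum.inl "gemsockets"]

def merge_fields (row : List (String × String)) (pair : String × String) : String :=
  let av := (PySem.Dict.mk row).getD pair.1 ""
  let bv := (PySem.Dict.mk row).getD pair.2 ""
  if (av == "" || PySem.Str.strip av == "0") && (bv == "" || PySem.Str.strip bv == "0") then ""
  else if av == "" || PySem.Str.strip av == "0" then
    (if bv != "" && PySem.Str.strip bv != "0" then bv else "")
  else if bv == "" || PySem.Str.strip bv == "0" then
    (if av != "" && PySem.Str.strip av != "0" then av else "")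
  else PySem.Str.join "-" [av, bv]   -- f"{av}-{bv}"

def process_type2 (val : String) : String :=
  if PySem.Str.isIn "1wep" val then ""
  else if PySem.Str.isIn "slam" val then "Slam"
  else val

def get_type_display (type_code : String) : String :=
  (PySem.Dict.mk type_display_map).getD type_code type_code

def blank_if_zero (val : String) : String :=
  if val == "" || PySem.Str.strip val == "0" then "" else val

def get_active_columns (data : List (List (String × String))) : List Int :=
  (PySem.List.enumerate fields 0).foldl (fun active p =>
    -- inner 'for row in data: … found = True; break' loop
    let found := data.any (fun row =>
      (match p.2 with
       | Sum.inr pair => merge_fields row pair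
       | Sum.inl field =>
         if field == "type2" then process_type2 ((PySem.Dict.mk row).getD "type2" "")
         else if field == "type" then get_type_display ((PySem.Dict.mk row).getD "type" "")
         else blank_if_zero ((PySem.Dict.mk row).getD field "")) != "")
    if found then active ++ [p.1] else active) []

-- ===== PORT B =====
def nonzeroB (v : String) : Bool := v != "" && PySem.Str.strip v != "0"

def isActiveB (row : List (String × String)) (field : String ⊕ (String × String)) : Bool :=
  match field with
  | Sum.inr pair =>
    nonzeroB ((PySem.Dict.mk row).getD pair.1 "") || nonzeroB ((PySem.Dict.mk row).getD pair.2 "")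
  | Sum.inl f =>
    let v := (PySem.Dict.mk row).getD f ""
    if f == "type2" then v != "" && !(PySem.Str.isIn "1wep" v)
    else if f == "type" then v != ""
    else nonzeroB v

def get_active_columns_alt (data : List (List (String × String))) : List Int :=
  let flags := data.foldl
    (fun flags row => (flags.zip fields).map (fun p => p.1 || isActiveB row p.2))
    (List.replicate fields.length false)
  (PySem.List.enumerate flags 0).foldl (fun out p => if p.2 then out ++ [p.1] else out) []

-- ===== PRECONDITION & SPEC =====
def Spec_get_active_columns (data : List (List (String × String))) (out : List Int) : Prop := out = get_active_columns_alt data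
instance (data : List (List (String × String))) (out : List Int) : Decidable (Spec_get_active_columns data out) := by unfold Spec_get_active_columns; infer_instance

-- ===== CLAIM (what is proved, stated in full; the proofs are below) =====
def Claim_equal_get_active_columns : Prop := ∀ (data : List (List (String × String))), Dom_get_active_columns data → Spec_get_active_columns data (get_active_columns data)

-- ===== LEMMAS AND PROOFS =====

-- "-".join of two strings is never empty (the separator is in it)
theorem join_dash_ne (a b : String) : (PySem.Str.join "-" [a, b] != "") = true := by
  simp only [bne, Bool.not_eq_true', beq_eq_false_iff_ne, ne_eq]
  intro h
  have h2 : (PySem.Str.join "-" [a, b]).toList = [] := by rw [h]; rfl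
  rw [PySem.Str.toList_join] at h2
  simp [PySem.Chars.join, List.intercalate] at h2

-- getD on an assoc list whose values are all non-empty, with a non-empty default, is non-empty
theorem getD_ne_empty (l : List (String × String)) (tc d : String)
    (hl : l.all (fun p => p.2 != "") = true) (hd : d ≠ "") :
    (PySem.Dict.mk l).getD tc d ≠ "" := by
  induction l with
  | nil => simpa [PySem.Dict.getD_eq_get?_getD] using hd
  | cons p rest ih =>
    simp only [List.all_cons, Bool.and_eq_true] at hl
    rw [PySem.Dict.getD_eq_get?_getD, PySem.Dict.get?_mk_cons]
    cases hk : p.1 == tc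
    · simp only [Bool.false_eq_true, if_false]
      rw [← PySem.Dict.getD_eq_get?_getD]
      exact ih hl.2
    · simp only [if_true, Option.getD_some]
      simpa using hl.1

-- B's predicate written as the negation of A's "blank" test
theorem nonzeroB_eq_not (s : String) :
    nonzeroB s = !(s == "" || PySem.Str.strip s == "0") := by
  cases h1 : s == "" <;> cases h2 : PySem.Str.strip s == "0" <;> simp [nonzeroB, h1, h2, bne]

-- the four per-field value computations of A are non-empty exactly when B's predicate holds
theorem merge_ne (row : List (String × String)) (pair : String × String) :
    (merge_fields row pair != "")
      = (nonzeroB ((PySem.Dict.mk row).getD pair.1 "") || nonzeroB ((PySem.Dict.mk row).getD pair.2 "")) := by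
  unfold merge_fields
  set av := (PySem.Dict.mk row).getD pair.1 "" with hav
  set bv := (PySem.Dict.mk row).getD pair.2 "" with hbv
  rw [nonzeroB_eq_not, nonzeroB_eq_not]
  by_cases hA : (av == "" || PySem.Str.strip av == "0") = true
  · by_cases hB : (bv == "" || PySem.Str.strip bv == "0") = true
    · simp [hA, hB]
    · have hb := Bool.or_eq_false_iff.mp (Bool.not_eq_true _ |>.mp hB)
      simp [hA, bne, hb.1, hb.2]
  · by_cases hB : (bv == "" || PySem.Str.strip bv == "0") = true
    · have ha := Bool.or_eq_false_iff.mp (Bool.not_eq_true _ |>.mp hA)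
      simp [hB, bne, ha.1, ha.2]
    · simp [hA, hB, join_dash_ne]

theorem type2_ne (v : String) :
    (process_type2 v != "") = (v != "" && !(PySem.Str.isIn "1wep" v)) := by
  unfold process_type2
  simp only [PySem.Str.isIn]
  by_cases h1 : PySem.Chars.isIn ['1','w','e','p'] v.toList = true
  · simp [h1]
  · by_cases h2 : PySem.Chars.isIn ['s','l','a','m'] v.toList = true
    · have hv : v ≠ "" := by
        intro he; subst he; revert h2; decide
      simp [h1, h2, hv]
    · simp [h1, h2]

theorem type_ne (tc : String) : (get_type_display tc != "") = (tc != "") := by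
  by_cases h : tc = ""
  · subst h; decide
  · have hne := getD_ne_empty type_display_map tc tc (by decide) h
    unfold get_type_display
    simp [bne, h, hne]

theorem blank_ne (v : String) : (blank_if_zero v != "") = nonzeroB v := by
  unfold blank_if_zero nonzeroB
  cases hv : v == "" <;> cases hs : PySem.Str.strip v == "0" <;>
    simp_all [bne, beq_iff_eq]

-- A's inline dispatch is non-empty exactly when B's predicate holds
theorem valA_ne (row : List (String × String)) (f : String ⊕ (String × String)) :
    ((match f with
      | Sum.inr pair => merge_fields row pair
      | Sum.inl field =>
        if field == "type2" then process_type2 ((PySem.Dict.mk row).getD "type2" "")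
        else if field == "type" then get_type_display ((PySem.Dict.mk row).getD "type" "")
        else blank_if_zero ((PySem.Dict.mk row).getD field "")) != "") = isActiveB row f := by
  cases f with
  | inr pair => exact merge_ne row pair
  | inl field =>
    unfold isActiveB
    by_cases h2 : (field == "type2") = true
    · rw [beq_iff_eq.mp h2]
      simp [type2_ne]
    · by_cases ht : (field == "type") = true
      · rw [beq_iff_eq.mp ht]
        simp [type_ne]
      · simp only [h2, ht, Bool.false_eq_true, if_false]
        exact blank_ne _

-- re-zipping the fields onto an updated flag list composes the updates
theorem zip_map_zip {F : Type} (fl : List Bool) (fs : List F) (g h : Bool → F → Bool) :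
    (((fl.zip fs).map (fun p => g p.1 p.2)).zip fs).map (fun p => h p.1 p.2)
      = (fl.zip fs).map (fun p => h (g p.1 p.2) p.2) := by
  induction fl generalizing fs with
  | nil => simp
  | cons b bs ih => cases fs with
    | nil => simp
    | cons f fsl => simp [ih]

-- invariant of B's row loop: each flag records 'some processed row has a non-empty value'
theorem flags_inv {F R : Type} (v : R → F → Bool) (rows : List R) :
    ∀ (fl : List Bool) (fs : List F), fl.length = fs.length →
    rows.foldl (fun flags row => (flags.zip fs).map (fun p => p.1 || v row p.2)) fl
      = (fl.zip fs).map (fun p => p.1 || rows.any (fun row => v row p.2)) := by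
  induction rows with
  | nil =>
    intro fl fs h
    simpa using (List.map_fst_zip (le_of_eq h)).symm
  | cons r rest ih =>
    intro fl fs h
    simp only [List.foldl_cons]
    rw [ih ((fl.zip fs).map (fun p => p.1 || v r p.2)) fs
        (by simp [List.length_zip, h])]
    rw [zip_map_zip fl fs (fun a f => a || v r f) (fun a f => a || rest.any (fun row => v row f))]
    simp [Bool.or_assoc]

-- starting from all-false flags, the result is just the per-field 'any row non-empty' map
theorem flags_repl {F : Type} (q : F → Bool) :
    ∀ (fs : List F),
    ((List.replicate fs.length false).zip fs).map (fun p => p.1 || q p.2) = fs.map q := by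
  intro fs
  induction fs with
  | nil => simp
  | cons f fsl ih => simpa [List.replicate_succ] using ih

theorem enum_filter_map {F : Type} (g : F → Bool) :
    ∀ (fs : List F) (s : Int),
    (((PySem.List.enumerate (fs.map g) s).filter (fun p => p.2)).map (fun p => p.1))
      = (((PySem.List.enumerate fs s).filter (fun p => g p.2)).map (fun p => p.1)) := by
  intro fs
  induction fs with
  | nil => intro s; simp [PySem.List.enumerate_nil]
  | cons f fsl ih =>
    intro s
    simp only [List.map_cons, PySem.List.enumerate_cons, List.filter_cons]
    by_cases hg : g f = true
    · simp [hg, ih (s + 1)]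
    · simp [hg, ih (s + 1)]

-- ===== VERDICT (by name: the statement is the Claim_ definition above) =====
theorem get_active_columns_spec : Claim_equal_get_active_columns := by
  intro data _
  show get_active_columns data = get_active_columns_alt data
  have hA : get_active_columns data =
      (PySem.List.enumerate fields 0).foldl
        (fun active p =>
          if data.any (fun row => isActiveB row p.2) then active ++ [p.1] else active) [] := by
    unfold get_active_columns
    apply PySem.List.foldl_congr_mem
    intro acc p _
    rw [show (data.any (fun row =>
      (match p.2 with
       | Sum.inr pair => merge_fields row pair
       | Sum.inl field =>
         if field == "type2" then process_type2 ((PySem.Dict.mk row).getD "type2" "")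
         else if field == "type" then get_type_display ((PySem.Dict.mk row).getD "type" "")
         else blank_if_zero ((PySem.Dict.mk row).getD field "")) != ""))
      = data.any (fun row => isActiveB row p.2) from
      PySem.List.any_congr_mem (fun row _ => valA_ne row p.2)]
  have hB : get_active_columns_alt data =
      (PySem.List.enumerate
        (data.foldl
          (fun flags row => (flags.zip fields).map (fun p => p.1 || isActiveB row p.2))
          (List.replicate fields.length false)) 0).foldl
        (fun out p => if p.2 then out ++ [p.1] else out) [] := rfl
  rw [hA, hB]
  rw [flags_inv (fun row fd => isActiveB row fd) data
      (List.replicate fields.length false) fields (by simp)]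
  rw [flags_repl (fun fd => data.any (fun row => isActiveB row fd)) fields]
  rw [PySem.List.foldl_append_if (fun p : Int × Bool => p.2) (fun p => p.1)]
  rw [enum_filter_map (fun fd => data.any (fun row => isActiveB row fd)) fields 0]
  rw [PySem.List.foldl_append_if
      (fun p : Int × (String ⊕ (String × String)) => data.any (fun row => isActiveB row p.2))
      (fun p => p.1)]
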